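-- pv_equiv track=rewrite | github.com/xiuwenz2/SAP-Hypo5 | utils/postprocessing.py | _normalize_unit_rotation_by_earliest_occurrence
-- ===== SOURCE A (Python) =====
-- from typing import List, Tuple, Optional, Dict, Any
--
-- def _first_index(sub: List[str], arr: List[str]) -> int:
--     """Return the first index where `sub` appears in `arr`, or -1 if not found."""
--     n, k = len(arr), len(sub)
--     if k == 0 or k > n:
--         return -1
--     i = 0
--     while i + k <= n:
--         if arr[i : i + k] == sub:
--             return i
--         i += 1
--     return -1
--
-- def _normalize_unit_rotation_by_earliest_occurrence(unit: List[str], words: List[str]) -> List[str]: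
--     """
--     Rotate the unit (all left rotations) and pick the rotation that occurs earliest in `words`.
--     On ties, prefer the smallest rotation amount.
--     """
--     m = len(unit)
--     if m == 0:
--         return unit
--
--     best = None  # (first_pos, rotation_amount, rotated_unit)
--     for r in range(m):  # left-rotate by r
--         rot = unit[r:] + unit[:r]
--         pos = _first_index(rot, words)
--         if pos == -1:
--             continue
--         cand = (pos, r, rot)
--         if best is None or cand < best:
--             best = cand
--     return best[2] if best is not None else unit
-- ===== SOURCE B (Python) =====
-- from typing import List
--
-- def _normalize_unit_rotation_by_earliest_occurrence(unit: List[str], words: List[str]) -> List[str]: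
--     """
--     Single left-to-right scan of `words`: precompute the set of all left rotations
--     of `unit`, return the first window of `words` that is a rotation (this window
--     is exactly the rotation with the earliest occurrence; among rotations equal as
--     sequences the smallest rotation amount gives the same word list).
--     """
--     m = len(unit)
--     if m == 0:
--         return unit
--     rotations = {tuple(unit[r:] + unit[:r]) for r in range(m)}
--     for i in range(len(words) - m + 1):
--         window = tuple(words[i:i + m])
--         if window in rotations:
--             return list(window)
--     return unit
-- ===== Notes on version B (the rewrite author's own statement) =====
-- stated objective: alternative
-- what changed: Instead of searching words separately for each of the m rotations and keeping the lexicographically best (pos, r) candidate, B precomputes the set of all rotations once and makes a single left-to-right scan of words, returning the first window that is a rotation; that window is exactly the earliest-occurring rotation with the smallest rotation amount.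
import Mathlib
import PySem

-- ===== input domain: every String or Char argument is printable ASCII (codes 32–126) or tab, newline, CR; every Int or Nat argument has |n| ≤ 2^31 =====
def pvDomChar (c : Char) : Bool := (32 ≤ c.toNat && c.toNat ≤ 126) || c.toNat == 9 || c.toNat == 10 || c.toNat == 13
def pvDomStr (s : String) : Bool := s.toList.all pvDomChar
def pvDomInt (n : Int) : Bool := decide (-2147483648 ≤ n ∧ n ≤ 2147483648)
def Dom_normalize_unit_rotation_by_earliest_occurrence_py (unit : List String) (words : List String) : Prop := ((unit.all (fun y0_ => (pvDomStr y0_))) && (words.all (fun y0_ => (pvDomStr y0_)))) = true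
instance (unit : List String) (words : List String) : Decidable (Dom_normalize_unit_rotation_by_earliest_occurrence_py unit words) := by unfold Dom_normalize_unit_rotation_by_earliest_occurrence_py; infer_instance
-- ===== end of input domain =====

-- B replaces A's per-rotation searches of `words` (best (pos, r) kept across rotations) by one
-- precomputed rotation set and a single left-to-right scan of `words`; exact same result.


-- ===== PORT A =====
-- _first_index's while loop (arr[i:i+k] with 0 ≤ i, i+k ≤ n is (arr.drop i).take k, exact)
def firstIndexAux (sub arr : List String) (k n i : Nat) : Int :=
  if i + k ≤ n then
    if (arr.drop i).take k = sub then (i : Int)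
    else firstIndexAux sub arr k n (i + 1)
  else -1
termination_by n + 1 - i
decreasing_by omega

def firstIndex (sub arr : List String) : Int :=
  if sub.length = 0 ∨ sub.length > arr.length then -1
  else firstIndexAux sub arr sub.length arr.length 0

-- the body of A's `for r in range(m)` loop. Python compares cand < best on tuples
-- (pos, r, rot) lexicographically; the third component never decides because the
-- rotation amounts r fed to the loop are pairwise distinct, so the comparison is
-- transcribed on the first two components.
def bestStep (words unit : List String) (best : Option (Int × Nat × List String)) (r : Nat) :
    Option (Int × Nat × List String) :=
  let rot := unit.drop r ++ unit.take r
  let pos := firstIndex rot words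
  if pos = -1 then best
  else
    match best with
    | none => some (pos, r, rot)
    | some b => if pos < b.1 ∨ (pos = b.1 ∧ r < b.2.1) then some (pos, r, rot) else some b

def normalize_unit_rotation_by_earliest_occurrence_py (unit : List String) (words : List String) : List String :=
  if unit.length = 0 then unit
  else
    match (List.range unit.length).foldl (bestStep words unit) none with
    | some b => b.2.2
    | none => unit

-- ===== PORT B =====
-- B's scan `for i in range(len(words) - m + 1)` (empty when m > len(words)+1,
-- matched by Nat truncation in `words.length + 1 - m`)
def altScan (rots : List (List String)) (unit words : List String) (m i : Nat) : List String :=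
  if i < words.length + 1 - m then
    if (words.drop i).take m ∈ rots then (words.drop i).take m
    else altScan rots unit words m (i + 1)
  else unit
termination_by words.length + 1 - m - i
decreasing_by omega

def normalize_unit_rotation_by_earliest_occurrence_py_alt (unit : List String) (words : List String) : List String :=
  if unit.length = 0 then unit
  else
    let rots : PySem.Set (List String) :=
      PySem.Set.ofList ((List.range unit.length).map (fun r => unit.drop r ++ unit.take r))
    altScan rots unit words unit.length 0

-- ===== PRECONDITION & SPEC =====
def Spec_normalize_unit_rotation_by_earliest_occurrence_py (unit : List String) (words : List String) (out : List String) : Prop := out = normalize_unit_rotation_by_earliest_occurrence_py_alt unit words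
instance (unit : List String) (words : List String) (out : List String) : Decidable (Spec_normalize_unit_rotation_by_earliest_occurrence_py unit words out) := by unfold Spec_normalize_unit_rotation_by_earliest_occurrence_py; infer_instance

-- ===== CLAIM (what is proved, stated in full; the proofs are below) =====
def Claim_equal_normalize_unit_rotation_by_earliest_occurrence_py : Prop := ∀ (unit : List String) (words : List String), Dom_normalize_unit_rotation_by_earliest_occurrence_py unit words → Spec_normalize_unit_rotation_by_earliest_occurrence_py unit words (normalize_unit_rotation_by_earliest_occurrence_py unit words)

-- ===== LEMMAS AND PROOFS =====

lemma rot_length (unit : List String) (r : Nat) :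
    (unit.drop r ++ unit.take r).length = unit.length := by
  simp; omega

-- firstIndexAux: -1 when no match from i on
lemma fia_none (sub arr : List String) (k n i : Nat)
    (h : ∀ j, i ≤ j → j + k ≤ n → (arr.drop j).take k ≠ sub) :
    firstIndexAux sub arr k n i = -1 := by
  fun_induction firstIndexAux sub arr k n i with
  | case1 i hle heq => exact absurd heq (h i le_rfl hle)
  | case2 i hle hne ih => exact ih (fun j hj => h j (by omega))
  | case3 i hgt => rfl

-- firstIndexAux: the first match from i on
lemma fia_some (sub arr : List String) (k n i j : Nat)
    (hij : i ≤ j) (hjn : j + k ≤ n) (hj : (arr.drop j).take k = sub)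
    (hmin : ∀ t, i ≤ t → t < j → (arr.drop t).take k ≠ sub) :
    firstIndexAux sub arr k n i = (j : Int) := by
  fun_induction firstIndexAux sub arr k n i with
  | case1 i hle heq =>
    rcases Nat.eq_or_lt_of_le hij with h | h
    · simp [h]
    · exact absurd heq (hmin i le_rfl h)
  | case2 i hle hne ih =>
    rcases Nat.eq_or_lt_of_le hij with h | h
    · exact absurd (h ▸ hj) hne
    · exact ih h (fun t ht => hmin t (by omega))
  | case3 i hgt => omega

-- firstIndexAux: a non-(-1) result is a genuine match position
lemma fia_inv (sub arr : List String) (k n i : Nat)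
    (h : firstIndexAux sub arr k n i ≠ -1) :
    ∃ j, i ≤ j ∧ j + k ≤ n ∧ (arr.drop j).take k = sub ∧
      firstIndexAux sub arr k n i = (j : Int) := by
  fun_induction firstIndexAux sub arr k n i with
  | case1 i hle heq => exact ⟨i, le_rfl, hle, heq, rfl⟩
  | case2 i hle hne ih =>
    obtain ⟨j, h1, h2, h3, h4⟩ := ih h
    exact ⟨j, by omega, h2, h3, h4⟩
  | case3 i hgt => exact absurd rfl h

-- altScan: no window is a rotation from i on
lemma alt_none (rots : List (List String)) (unit words : List String) (m i : Nat)
    (h : ∀ j, i ≤ j → j < words.length + 1 - m → (words.drop j).take m ∉ rots) :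
    altScan rots unit words m i = unit := by
  fun_induction altScan rots unit words m i with
  | case1 i hlt hmem => exact absurd hmem (h i le_rfl hlt)
  | case2 i hlt hnm ih => exact ih (fun j hj => h j (by omega))
  | case3 i hge => rfl

-- altScan: returns the first window that is a rotation
lemma alt_some (rots : List (List String)) (unit words : List String) (m i j : Nat)
    (hij : i ≤ j) (hjb : j < words.length + 1 - m) (hj : (words.drop j).take m ∈ rots)
    (hmin : ∀ t, i ≤ t → t < j → (words.drop t).take m ∉ rots) :
    altScan rots unit words m i = (words.drop j).take m := by
  fun_induction altScan rots unit words m i with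
  | case1 i hlt hmem =>
    rcases Nat.eq_or_lt_of_le hij with h | h
    · rw [h]
    · exact absurd hmem (hmin i le_rfl h)
  | case2 i hlt hnm ih =>
    rcases Nat.eq_or_lt_of_le hij with h | h
    · exact absurd (h ▸ hj) hnm
    · exact ih h (fun t ht => hmin t (by omega))
  | case3 i hge => omega

-- fold keeps `best` when every remaining rotation misses
lemma fold_all_miss (words unit : List String) (rs : List Nat) (best : Option (Int × Nat × List String))
    (h : ∀ r ∈ rs, firstIndex (unit.drop r ++ unit.take r) words = -1) :
    rs.foldl (bestStep words unit) best = best := by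
  induction rs generalizing best with
  | nil => rfl
  | cons a rs ih =>
    have ha := h a (List.mem_cons_self)
    simp only [List.foldl_cons]
    rw [show bestStep words unit best a = best by
      unfold bestStep; simp [ha]]
    exact ih best (fun r hr => h r (List.mem_cons_of_mem _ hr))

-- fold keeps a best no remaining candidate strictly beats
lemma fold_keep (words unit : List String) (rs : List Nat) (b : Int × Nat × List String)
    (h : ∀ r ∈ rs, firstIndex (unit.drop r ++ unit.take r) words = -1 ∨
      ¬ (firstIndex (unit.drop r ++ unit.take r) words < b.1 ∨
         (firstIndex (unit.drop r ++ unit.take r) words = b.1 ∧ r < b.2.1))) :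
    rs.foldl (bestStep words unit) (some b) = some b := by
  induction rs with
  | nil => rfl
  | cons a rs ih =>
    have ha := h a (List.mem_cons_self)
    simp only [List.foldl_cons]
    rw [show bestStep words unit (some b) a = some b by
      unfold bestStep
      rcases ha with ha | ha
      · simp [ha]
      · by_cases hm : firstIndex (unit.drop a ++ unit.take a) words = -1
        · simp [hm]
        · simp [hm, ha]]
    exact ih (fun r hr => h r (List.mem_cons_of_mem _ hr))

-- fold finds the strict lexicographic minimum candidate
lemma fold_min (words unit : List String) :
    ∀ (rs : List Nat) (best : Option (Int × Nat × List String)) (rstar : Nat),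
      rstar ∈ rs →
      firstIndex (unit.drop rstar ++ unit.take rstar) words ≠ -1 →
      (∀ r ∈ rs, r ≠ rstar → firstIndex (unit.drop r ++ unit.take r) words ≠ -1 →
        (firstIndex (unit.drop rstar ++ unit.take rstar) words < firstIndex (unit.drop r ++ unit.take r) words ∨
         (firstIndex (unit.drop rstar ++ unit.take rstar) words = firstIndex (unit.drop r ++ unit.take r) words ∧ rstar < r))) →
      (∀ b, best = some b →
        (firstIndex (unit.drop rstar ++ unit.take rstar) words < b.1 ∨
         (firstIndex (unit.drop rstar ++ unit.take rstar) words = b.1 ∧ rstar < b.2.1))) →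
      rs.foldl (bestStep words unit) best =
        some (firstIndex (unit.drop rstar ++ unit.take rstar) words, rstar,
              unit.drop rstar ++ unit.take rstar) := by
  intro rs
  induction rs with
  | nil => intro best rstar hmem _ _ _; exact absurd hmem (List.not_mem_nil)
  | cons a rs ih =>
    intro best rstar hmem hne hbeat hbest
    simp only [List.foldl_cons]
    by_cases haeq : a = rstar
    · subst haeq
      have hstep : bestStep words unit best a =
          some (firstIndex (unit.drop a ++ unit.take a) words, a, unit.drop a ++ unit.take a) := by
        unfold bestStep
        cases best with
        | none => simp [hne]
        | some b => simp [hne, hbest b rfl]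
      rw [hstep]
      apply fold_keep
      intro r hr
      by_cases hrm : firstIndex (unit.drop r ++ unit.take r) words = -1
      · exact Or.inl hrm
      · right
        by_cases hra : r = a
        · subst hra; simp
        · have := hbeat r (List.mem_cons_of_mem _ hr) hra hrm
          simp only [not_or, not_lt, not_and]
          omega
    · have hmem' : rstar ∈ rs := by
        rcases List.mem_cons.mp hmem with h | h
        · exact absurd h.symm haeq
        · exact h
      apply ih (bestStep words unit best a) rstar hmem' hne
        (fun r hr hrne hrm => hbeat r (List.mem_cons_of_mem _ hr) hrne hrm)
      intro b hb
      by_cases ham : firstIndex (unit.drop a ++ unit.take a) words = -1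
      · rw [show bestStep words unit best a = best from by unfold bestStep; simp [ham]] at hb
        exact hbest b hb
      · have hbeata := hbeat a List.mem_cons_self haeq ham
        cases best with
        | none =>
          rw [show bestStep words unit none a =
              some (firstIndex (unit.drop a ++ unit.take a) words, a, unit.drop a ++ unit.take a)
            from by unfold bestStep; simp [ham]] at hb
          cases hb; exact hbeata
        | some b0 =>
          have hb0 := hbest b0 rfl
          by_cases hlt : (firstIndex (unit.drop a ++ unit.take a) words < b0.1 ∨
              (firstIndex (unit.drop a ++ unit.take a) words = b0.1 ∧ a < b0.2.1))
          · rw [show bestStep words unit (some b0) a =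
                some (firstIndex (unit.drop a ++ unit.take a) words, a, unit.drop a ++ unit.take a)
              from by unfold bestStep; simp [ham, hlt]] at hb
            cases hb; exact hbeata
          · rw [show bestStep words unit (some b0) a = some b0
              from by unfold bestStep; simp [ham, hlt]] at hb
            cases hb; exact hb0

-- firstIndex on a rotation: wrappers hiding the aux loop (rotations have unit's length)
lemma firstIndex_rot_none (unit words : List String) (r : Nat) (hm : unit.length ≠ 0)
    (h : ∀ j, j + unit.length ≤ words.length →
      (words.drop j).take unit.length ≠ unit.drop r ++ unit.take r) :
    firstIndex (unit.drop r ++ unit.take r) words = -1 := by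
  unfold firstIndex
  rw [rot_length]
  by_cases hmn : unit.length ≤ words.length
  · rw [if_neg (by omega)]
    exact fia_none _ _ _ _ _ (fun j _ hjn => h j hjn)
  · rw [if_pos (by omega)]

lemma firstIndex_rot_eq (unit words : List String) (r j : Nat) (hm : unit.length ≠ 0)
    (hjn : j + unit.length ≤ words.length)
    (hj : (words.drop j).take unit.length = unit.drop r ++ unit.take r)
    (hmin : ∀ t, t < j → (words.drop t).take unit.length ≠ unit.drop r ++ unit.take r) :
    firstIndex (unit.drop r ++ unit.take r) words = (j : Int) := by
  unfold firstIndex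
  rw [rot_length, if_neg (by omega)]
  exact fia_some _ _ _ _ 0 j (Nat.zero_le _) hjn hj (fun t _ htj => hmin t htj)

lemma firstIndex_rot_inv (unit words : List String) (r : Nat)
    (h : firstIndex (unit.drop r ++ unit.take r) words ≠ -1) :
    ∃ j, j + unit.length ≤ words.length ∧
      (words.drop j).take unit.length = unit.drop r ++ unit.take r ∧
      firstIndex (unit.drop r ++ unit.take r) words = (j : Int) := by
  unfold firstIndex at h
  rw [rot_length] at h
  by_cases hc : unit.length = 0 ∨ unit.length > words.length
  · rw [if_pos hc] at h; exact absurd rfl h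
  · rw [if_neg hc] at h
    obtain ⟨j, _, hjn, hjeq, hjval⟩ := fia_inv _ _ _ _ _ h
    refine ⟨j, hjn, hjeq, ?_⟩
    unfold firstIndex
    rw [rot_length, if_neg hc]
    exact hjval

-- membership in B's rotation set
lemma mem_rots (unit : List String) (w : List String) :
    w ∈ PySem.Set.ofList ((List.range unit.length).map (fun r => unit.drop r ++ unit.take r)) ↔
      ∃ r, r < unit.length ∧ unit.drop r ++ unit.take r = w := by
  rw [PySem.Set.mem_ofList]
  simp [List.mem_map, List.mem_range]

-- the central equivalence, proved by cases on whether any window of `words` is a rotation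
lemma main_eq (unit words : List String) :
    normalize_unit_rotation_by_earliest_occurrence_py unit words =
      normalize_unit_rotation_by_earliest_occurrence_py_alt unit words := by
  unfold normalize_unit_rotation_by_earliest_occurrence_py
    normalize_unit_rotation_by_earliest_occurrence_py_alt
  by_cases hm : unit.length = 0
  · simp [hm]
  · simp only [hm, if_false]
    by_cases hex : ∃ j, j < words.length + 1 - unit.length ∧
        ∃ r, r < unit.length ∧ unit.drop r ++ unit.take r = (words.drop j).take unit.length
    · -- some window is a rotation: both return the earliest such window
      obtain ⟨hjb, hrex⟩ := Nat.find_spec hex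
      obtain ⟨hrm, hrot⟩ := Nat.find_spec hrex
      have hmn : unit.length ≤ words.length := by omega
      -- B returns the window at Nat.find hex
      have hB : altScan (PySem.Set.ofList ((List.range unit.length).map
            (fun r => unit.drop r ++ unit.take r))) unit words unit.length 0 =
          (words.drop (Nat.find hex)).take unit.length := by
        apply alt_some _ unit words unit.length 0 (Nat.find hex) (Nat.zero_le _) hjb
        · rw [mem_rots]; exact ⟨Nat.find hrex, hrm, hrot⟩
        · intro t _ htj hmem
          rw [mem_rots] at hmem
          exact Nat.find_min hex htj ⟨by omega, hmem⟩
      -- A's candidate at the winning rotation amount sits at the same position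
      have hFr : firstIndex (unit.drop (Nat.find hrex) ++ unit.take (Nat.find hrex)) words
          = (Nat.find hex : Int) := by
        apply firstIndex_rot_eq unit words _ _ hm (by omega) hrot.symm
        intro t htj hteq
        exact Nat.find_min hex htj ⟨by omega, Nat.find hrex, hrm, hteq.symm⟩
      -- every other occurring rotation is strictly worse in (pos, r)
      have hbeat : ∀ r ∈ List.range unit.length, r ≠ Nat.find hrex →
          firstIndex (unit.drop r ++ unit.take r) words ≠ -1 →
          (firstIndex (unit.drop (Nat.find hrex) ++ unit.take (Nat.find hrex)) words <
             firstIndex (unit.drop r ++ unit.take r) words ∨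
           (firstIndex (unit.drop (Nat.find hrex) ++ unit.take (Nat.find hrex)) words =
             firstIndex (unit.drop r ++ unit.take r) words ∧ Nat.find hrex < r)) := by
        intro r hr hrne hrm'
        rw [List.mem_range] at hr
        obtain ⟨jr, hjrn, hjreq, hjrval⟩ := firstIndex_rot_inv unit words r hrm'
        rw [hjrval, hFr]
        have hjrb : jr < words.length + 1 - unit.length := by omega
        have hjge : Nat.find hex ≤ jr := by
          by_contra hlt
          exact Nat.find_min hex (by omega) ⟨hjrb, r, hr, hjreq.symm⟩
        rcases Nat.eq_or_lt_of_le hjge with heq | hlt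
        · right
          refine ⟨by exact_mod_cast heq, ?_⟩
          have : Nat.find hrex ≤ r := by
            by_contra hrlt
            exact Nat.find_min hrex (by omega) ⟨hr, by rw [heq]; exact hjreq.symm⟩
          omega
        · left; exact_mod_cast hlt
      have hA := fold_min words unit (List.range unit.length) none (Nat.find hrex)
        (List.mem_range.mpr hrm) (by rw [hFr]; omega) hbeat (fun b hb => by cases hb)
      rw [hA, hFr, hB, hrot]
    · -- no window is a rotation: both return unit
      push Not at hex
      have hB : altScan (PySem.Set.ofList ((List.range unit.length).map
            (fun r => unit.drop r ++ unit.take r))) unit words unit.length 0 = unit := by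
        apply alt_none
        intro j _ hjb hmem
        rw [mem_rots] at hmem
        obtain ⟨r, hr1, hr2⟩ := hmem
        exact hex j hjb r hr1 hr2
      have hA : (List.range unit.length).foldl (bestStep words unit) none = none := by
        apply fold_all_miss
        intro r hr
        rw [List.mem_range] at hr
        apply firstIndex_rot_none unit words r hm
        intro j hjn hjeq
        exact hex j (by omega) r hr hjeq.symm
      rw [hA, hB]

-- ===== VERDICT (by name: the statement is the Claim_ definition above) =====
theorem normalize_unit_rotation_by_earliest_occurrence_py_spec : Claim_equal_normalize_unit_rotation_by_earliest_occurrence_py := by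
  intro unit words _
  unfold Spec_normalize_unit_rotation_by_earliest_occurrence_py
  exact main_eq unit words
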